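-- pv_equiv track=rewrite | github.com/BenoitDervieux/BachelorComputerSciences | 3rd year/Algorithms and Advanced Data Structures/Python Book/Chapter 1/exr115.py | double_sequence
-- ===== SOURCE A (Python) =====
-- def double_sequence(n):
--     myset = set()
--     for x in n:
--         if (x in myset):
--             return False
--         else:
--             myset.add(x)
--     return True
-- ===== SOURCE B (Python) =====
-- def double_sequence(n):
--     items = list(n)
--     return len(set(items)) == len(items)
-- ===== Notes on version B (the rewrite author's own statement) =====
-- stated objective: idiomatic
-- what changed: Replaces the element-by-element scan with incremental membership tests and early exit by one cardinality comparison: build the whole set once and compare len(set(items)) == len(items).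
import Mathlib
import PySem

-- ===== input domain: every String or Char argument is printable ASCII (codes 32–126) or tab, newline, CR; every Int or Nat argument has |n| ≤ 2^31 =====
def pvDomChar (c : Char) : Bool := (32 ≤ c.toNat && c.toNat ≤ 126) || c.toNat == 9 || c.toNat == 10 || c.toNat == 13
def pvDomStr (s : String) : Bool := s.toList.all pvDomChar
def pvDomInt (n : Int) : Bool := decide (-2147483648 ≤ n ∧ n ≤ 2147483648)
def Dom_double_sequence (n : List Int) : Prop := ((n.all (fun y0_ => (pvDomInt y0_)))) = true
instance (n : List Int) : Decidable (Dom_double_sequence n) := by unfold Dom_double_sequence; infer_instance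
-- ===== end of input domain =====

-- B builds the whole set once and compares cardinalities instead of A's incremental membership scan with early exit (idiomatic rewrite).


-- ===== PORT A =====
-- loop of A: a growing set with early return False on a repeat
def doubleGo (s : PySem.Set Int) : List Int → Bool
  | [] => true
  | x :: xs => if PySem.Set.contains s x then false else doubleGo (PySem.Set.add s x) xs

def double_sequence (n : List Int) : Bool := doubleGo PySem.Set.empty n

-- ===== PORT B =====
-- B: len(set(items)) == len(items)
def double_sequence_alt (n : List Int) : Bool := (PySem.Set.ofList n).length == n.length

-- ===== PRECONDITION & SPEC =====
def Spec_double_sequence (n : List Int) (out : Bool) : Prop := out = double_sequence_alt n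
instance (n : List Int) (out : Bool) : Decidable (Spec_double_sequence n out) := by unfold Spec_double_sequence; infer_instance

-- ===== CLAIM (what is proved, stated in full; the proofs are below) =====
def Claim_equal_double_sequence : Prop := ∀ (n : List Int), Dom_double_sequence n → Spec_double_sequence n (double_sequence n)

-- ===== LEMMAS AND PROOFS =====

-- ===== VERDICT (by name: the statement is the Claim_ definition above) =====
lemma length_update_le (xs : List Int) : ∀ (s : PySem.Set Int),
    (PySem.Set.update s xs).length ≤ s.length + xs.length := by
  induction xs with
  | nil => intro s; simp [PySem.Set.update]
  | cons x xs ih =>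
    intro s
    have h1 : (PySem.Set.add s x).length ≤ s.length + 1 := by
      simp only [PySem.Set.add]
      split <;> simp
    have h2 := ih (PySem.Set.add s x)
    simp only [PySem.Set.update] at *
    simp only [List.foldl_cons, List.length_cons]
    omega

lemma doubleGo_eq (xs : List Int) : ∀ (s : PySem.Set Int),
    doubleGo s xs = ((PySem.Set.update s xs).length == s.length + xs.length) := by
  induction xs with
  | nil => intro s; simp [doubleGo, PySem.Set.update]
  | cons x xs ih =>
    intro s
    by_cases hc : PySem.Set.contains s x
    · have hm : x ∈ s := by
        have := hc; simp [PySem.Set.contains] at this; exact this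
      have hadd : PySem.Set.add s x = s := by simp [PySem.Set.add, hm]
      have hle := length_update_le xs s
      have hupd : PySem.Set.update s (x :: xs) = PySem.Set.update s xs := by
        simp [PySem.Set.update, hadd]
      rw [doubleGo, if_pos hc, hupd]
      simp only [List.length_cons]
      exact (by simp; omega)
    · have hm : x ∉ s := by
        have := hc; simp [PySem.Set.contains] at this; exact this
      have hadd : PySem.Set.add s x = s ++ [x] := by simp [PySem.Set.add, hm]
      have hupd : PySem.Set.update s (x :: xs) = PySem.Set.update (s ++ [x]) xs := by
        simp [PySem.Set.update, hadd]
      rw [doubleGo, if_neg hc, hadd, ih (s ++ [x])]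
      rw [← hadd, hupd, hadd]
      simp only [List.length_append, List.length_cons, List.length_nil]
      congr 1
      omega

theorem double_sequence_spec : Claim_equal_double_sequence := by
  intro n _
  unfold Spec_double_sequence double_sequence double_sequence_alt
  have h := doubleGo_eq n PySem.Set.empty
  rw [h]
  have : PySem.Set.update PySem.Set.empty n = PySem.Set.ofList n := rfl
  rw [this]
  simp [PySem.Set.empty]
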